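-- pv_equiv track=rewrite | github.com/szabo-roland/AoC2020 | 21/21.py | get_possible_sources
-- ===== SOURCE A (Python) =====
-- def get_possible_sources(foods):
--     possible_sources = {}
--     for ingredients, allergens in foods:
--         for allergen in allergens:
--             if allergen not in possible_sources:
--                 possible_sources[allergen] = set(ingredients)
--             else:
--                 possible_sources[allergen] = possible_sources[allergen].intersection(set(ingredients))
--     return possible_sources
-- ===== SOURCE B (Python) =====
-- def get_possible_sources(foods):
--     # Two passes: group the per-food ingredient sets by allergen, then
--     # intersect each allergen's group.  Same first-encounter key order as A.
--     groups = {}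
--     for ingredients, allergens in foods:
--         ing_set = set(ingredients)
--         for allergen in allergens:
--             groups.setdefault(allergen, []).append(ing_set)
--     result = {}
--     for allergen, sets in groups.items():
--         acc = set(sets[0])
--         for s in sets[1:]:
--             acc = acc.intersection(s)
--         result[allergen] = acc
--     return result
-- ===== Notes on version B (the rewrite author's own statement) =====
-- stated objective: alternative
-- what changed: B replaces A's interleaved intersect-as-you-go dict update with two passes: first group the per-food ingredient sets by allergen (building each ingredient set once per food instead of once per allergen occurrence), then reduce each group by intersection.
import Mathlib
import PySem

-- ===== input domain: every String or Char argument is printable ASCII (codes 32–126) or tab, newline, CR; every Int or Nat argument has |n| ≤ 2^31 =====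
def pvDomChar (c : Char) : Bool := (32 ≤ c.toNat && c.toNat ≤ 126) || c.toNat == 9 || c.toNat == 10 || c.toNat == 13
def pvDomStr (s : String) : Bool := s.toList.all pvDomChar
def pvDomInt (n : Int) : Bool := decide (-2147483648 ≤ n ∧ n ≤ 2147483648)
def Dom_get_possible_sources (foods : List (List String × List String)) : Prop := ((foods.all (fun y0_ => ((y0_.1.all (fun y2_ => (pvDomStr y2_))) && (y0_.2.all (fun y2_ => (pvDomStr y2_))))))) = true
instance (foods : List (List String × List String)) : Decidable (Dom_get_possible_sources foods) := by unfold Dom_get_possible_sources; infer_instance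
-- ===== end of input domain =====

-- B re-implements A in two passes (group ingredient sets per allergen, then intersect each group)
-- instead of A's interleaved intersect-as-you-go dict update; objective: alternative decomposition.


-- ===== PORT A =====
def get_possible_sources (foods : List (List String × List String)) : List (String × List String) :=
  (foods.foldl (fun d f =>
      f.2.foldl (fun d allergen =>
          if d.contains allergen = false then
            d.insert allergen (PySem.Set.ofList f.1)
          else
            d.insert allergen (PySem.Set.inter (d.getD allergen PySem.Set.empty) (PySem.Set.ofList f.1)))
        d)
    PySem.Dict.empty).items

-- ===== PORT B =====
-- acc = set(sets[0]); for s in sets[1:]: acc = acc.intersection(s)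
-- (the [] branch is unreachable: stored group lists are never empty)
def pvInterAll (l : List (List String)) : List String :=
  match l with
  | [] => []
  | s :: rest => rest.foldl PySem.Set.inter (PySem.Set.ofList s)

def get_possible_sources_alt (foods : List (List String × List String)) : List (String × List String) :=
  let groups := foods.foldl (fun d f =>
      f.2.foldl (fun d allergen =>
          d.modify allergen [] (fun l => l ++ [PySem.Set.ofList f.1]))
        d)
    PySem.Dict.empty
  (groups.items.foldl (fun r p => r.insert p.1 (pvInterAll p.2)) PySem.Dict.empty).items

-- ===== PRECONDITION & SPEC =====
def Spec_get_possible_sources (foods : List (List String × List String)) (out : List (String × List String)) : Prop := out = get_possible_sources_alt foods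
instance (foods : List (List String × List String)) (out : List (String × List String)) : Decidable (Spec_get_possible_sources foods out) := by unfold Spec_get_possible_sources; infer_instance

-- ===== CLAIM (what is proved, stated in full; the proofs are below) =====
def Claim_equal_get_possible_sources : Prop := ∀ (foods : List (List String × List String)), Dom_get_possible_sources foods → Spec_get_possible_sources foods (get_possible_sources foods)

-- ===== LEMMAS AND PROOFS =====

-- Invariant relating A's running dict dA to B's grouping dict dG.
def pvInv (dA : PySem.Dict String (List String)) (dG : PySem.Dict String (List (List String))) : Prop :=
  dA.keys = dG.keys ∧ dG.keys.Nodup ∧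
  (∀ k, dA.getD k [] = pvInterAll (dG.getD k [])) ∧
  (∀ k, dG.contains k = true → dG.getD k [] ≠ [])

lemma pvInterAll_append_singleton (l : List (List String)) (s : List String) (h : l ≠ []) :
    pvInterAll (l ++ [s]) = PySem.Set.inter (pvInterAll l) s := by
  cases l with
  | nil => exact absurd rfl h
  | cons s0 rest => simp [pvInterAll, List.foldl_append]

lemma pvStep (dA : PySem.Dict String (List String)) (dG : PySem.Dict String (List (List String)))
    (ings : List String) (a : String) (h : pvInv dA dG) :
    pvInv (if dA.contains a = false then dA.insert a (PySem.Set.ofList ings)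
           else dA.insert a (PySem.Set.inter (dA.getD a PySem.Set.empty) (PySem.Set.ofList ings)))
          (dG.modify a [] (fun l => l ++ [PySem.Set.ofList ings])) := by
  obtain ⟨hk, hnd, hv, hne⟩ := h
  have hcc : dA.contains a = dG.contains a := by
    rw [PySem.Dict.contains_eq_decide_mem_keys, PySem.Dict.contains_eq_decide_mem_keys, hk]
  by_cases hc : dG.contains a = true
  · -- key already present: both dicts keep their key lists
    have hcA : dA.contains a = true := by rw [hcc]; exact hc
    have hlne : dG.getD a [] ≠ [] := hne a hc
    rw [if_neg (by simp [hcA])]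
    refine ⟨?_, ?_, ?_, ?_⟩
    · rw [PySem.Dict.keys_insert_of_contains _ _ hcA, PySem.Dict.keys_modify,
        PySem.Dict.keys_insert_of_contains _ _ hc, hk]
    · rw [PySem.Dict.keys_modify, PySem.Dict.keys_insert_of_contains _ _ hc]; exact hnd
    · intro k
      rw [PySem.Dict.getD_insert, PySem.Dict.getD_modify]
      by_cases hka : k = a
      · rw [if_pos hka, if_pos hka]
        rw [pvInterAll_append_singleton _ _ hlne, ← hv a]
        rfl
      · simp only [if_neg hka]; exact hv k
    · intro k hkc
      rw [PySem.Dict.getD_modify]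
      by_cases hka : k = a
      · rw [if_pos hka]; simp
      · rw [if_neg hka]
        rw [PySem.Dict.contains_modify] at hkc
        simp only [Bool.or_eq_true, beq_iff_eq] at hkc
        exact hne k (hkc.resolve_left hka)
  · -- fresh key: both dicts append the key
    have hc' : dG.contains a = false := by simpa using hc
    have hcA : dA.contains a = false := by rw [hcc]; exact hc'
    have hmem : a ∉ dG.keys := by
      have := PySem.Dict.contains_eq_decide_mem_keys dG a
      rw [hc'] at this; simpa using this.symm
    rw [if_pos hcA]
    refine ⟨?_, ?_, ?_, ?_⟩
    · rw [PySem.Dict.keys_insert_of_not_contains _ _ hcA, PySem.Dict.keys_modify,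
        PySem.Dict.keys_insert_of_not_contains _ _ hc', hk]
    · rw [PySem.Dict.keys_modify, PySem.Dict.keys_insert_of_not_contains _ _ hc']
      simp only [List.nodup_append, List.nodup_singleton]
      refine ⟨hnd, trivial, ?_⟩
      intro x hx y hy
      rw [List.mem_singleton] at hy
      exact fun hxy => hmem ((hxy.trans hy) ▸ hx)
    · intro k
      rw [PySem.Dict.getD_insert, PySem.Dict.getD_modify]
      by_cases hka : k = a
      · rw [if_pos hka, if_pos hka]
        rw [PySem.Dict.getD_of_not_contains _ _ hc']
        simp [pvInterAll, PySem.Set.ofList_ofList]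
      · simp only [if_neg hka]; exact hv k
    · intro k hkc
      rw [PySem.Dict.getD_modify]
      by_cases hka : k = a
      · rw [if_pos hka]; simp
      · rw [if_neg hka]
        rw [PySem.Dict.contains_modify] at hkc
        simp only [Bool.or_eq_true, beq_iff_eq] at hkc
        exact hne k (hkc.resolve_left hka)

lemma pvInnerFold (alls : List String) (ings : List String) :
    ∀ (dA : PySem.Dict String (List String)) (dG : PySem.Dict String (List (List String))),
    pvInv dA dG →
    pvInv (alls.foldl (fun d allergen =>
            if d.contains allergen = false then
              d.insert allergen (PySem.Set.ofList ings)
            else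
              d.insert allergen (PySem.Set.inter (d.getD allergen PySem.Set.empty) (PySem.Set.ofList ings))) dA)
          (alls.foldl (fun d allergen => d.modify allergen [] (fun l => l ++ [PySem.Set.ofList ings])) dG) := by
  induction alls with
  | nil => intro dA dG h; exact h
  | cons a rest ih =>
    intro dA dG h
    exact ih _ _ (pvStep dA dG ings a h)

lemma pvOuterFold (foods : List (List String × List String)) :
    ∀ (dA : PySem.Dict String (List String)) (dG : PySem.Dict String (List (List String))),
    pvInv dA dG →
    pvInv (foods.foldl (fun d f =>
            f.2.foldl (fun d allergen =>
                if d.contains allergen = false then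
                  d.insert allergen (PySem.Set.ofList f.1)
                else
                  d.insert allergen (PySem.Set.inter (d.getD allergen PySem.Set.empty) (PySem.Set.ofList f.1))) d) dA)
          (foods.foldl (fun d f =>
            f.2.foldl (fun d allergen => d.modify allergen [] (fun l => l ++ [PySem.Set.ofList f.1])) d) dG) := by
  induction foods with
  | nil => intro dA dG h; exact h
  | cons f rest ih =>
    intro dA dG h
    exact ih _ _ (pvInnerFold f.2 f.1 dA dG h)

lemma pvInv_empty : pvInv PySem.Dict.empty PySem.Dict.empty := by
  refine ⟨rfl, List.nodup_nil, fun k => rfl, fun k hk => by simp [PySem.Dict.contains_empty] at hk⟩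

-- ===== VERDICT (by name: the statement is the Claim_ definition above) =====
theorem get_possible_sources_spec : Claim_equal_get_possible_sources := by
  intro foods _
  unfold Spec_get_possible_sources get_possible_sources get_possible_sources_alt
  obtain ⟨hk, hnd, hv, hne⟩ := pvOuterFold foods PySem.Dict.empty PySem.Dict.empty pvInv_empty
  set dA := foods.foldl _ PySem.Dict.empty with hdA
  set dG := foods.foldl _ PySem.Dict.empty with hdG
  have hndA : dA.keys.Nodup := hk ▸ hnd
  have hkeysG : List.map Prod.fst dG.items = dG.keys := rfl
  have hfresh : ∀ p ∈ dG.items, (PySem.Dict.empty : PySem.Dict String (List String)).contains p.1 = false :=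
    fun p _ => PySem.Dict.contains_empty p.1
  have hB := PySem.Dict.items_foldl_insert_fresh dG.items Prod.fst (fun p => pvInterAll p.2)
      PySem.Dict.empty hfresh (by rw [hkeysG]; exact hnd)
  simp only [hB]
  have hGitems := PySem.Dict.items_eq_map_keys dG hnd ([] : List (List String))
  have hAitems := PySem.Dict.items_eq_map_keys dA hndA ([] : List String)
  rw [hAitems, hGitems, hk]
  have hemp : (PySem.Dict.empty : PySem.Dict String (List String)).items = [] := rfl
  rw [hemp, List.nil_append, List.map_map]
  apply List.map_congr_left
  intro k _
  simp [Function.comp, hv k]
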